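-- pv_equiv track=rewrite | github.com/ruanimal/vscode-leetcode-cn | game/Count-decreasing-subarray.py | solution
-- ===== SOURCE A (Python) =====
-- def solution(arr: list) -> int:
--     if len(arr) < 2:
--         return len(arr)
--     i = 0
--     j = 1
--     count = 0
--     length = 1
--     while j < len(arr):
--         if arr[j] < arr[i]:
--             j += 1
--         else:
--             length = j - i
--             count += (length+1)*length//2
--             i = j
--             j += 1
--     length = j-i
--     return count + (length+1)*length//2
-- ===== SOURCE B (Python) =====
-- def solution(arr: list) -> int:
--     count = 0
--     run = 0
--     s = None
--     for x in arr:
--         if s is not None and x < s: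
--             run += 1
--         else:
--             s = x
--             run = 1
--         count += run
--     return count
-- ===== Notes on version B (the rewrite author's own statement) =====
-- stated objective: simpler
-- what changed: Replaced the two-pointer scan that emits a closed-form triangular sum at each run boundary by a single fold that tracks the current run's start and length and adds the run length at every element.
import Mathlib
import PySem

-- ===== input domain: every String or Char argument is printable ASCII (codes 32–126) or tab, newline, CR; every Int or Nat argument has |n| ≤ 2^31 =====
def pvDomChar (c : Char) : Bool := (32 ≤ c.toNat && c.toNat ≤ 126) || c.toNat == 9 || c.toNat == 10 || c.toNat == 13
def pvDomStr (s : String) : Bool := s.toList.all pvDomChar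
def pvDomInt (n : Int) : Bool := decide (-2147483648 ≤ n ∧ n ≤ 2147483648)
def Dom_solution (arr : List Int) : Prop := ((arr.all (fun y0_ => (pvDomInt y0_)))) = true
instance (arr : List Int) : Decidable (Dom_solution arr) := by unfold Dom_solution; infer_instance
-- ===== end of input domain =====

-- B replaces A's two-pointer scan with triangular closed-form sums per run by a single
-- fold adding the current run length at every element (simpler; same O(n) cost).


-- ===== PORT A =====
-- the while loop; i, j are Python ints that stay in [0, len], kept as Nat for the
-- termination measure, cast to Int for the Python arithmetic; arr[j] with 0 ≤ j < len
-- is exactly getD j 0 on this path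
def solutionLoop (arr : List Int) (i j : Nat) (count : Int) : Int :=
  if _h : j < arr.length then
    if arr.getD j 0 < arr.getD i 0 then
      solutionLoop arr i (j + 1) count
    else
      solutionLoop arr j (j + 1)
        (count + PySem.Int.floordiv ((((j : Int) - (i : Int)) + 1) * ((j : Int) - (i : Int))) 2)
  else
    count + PySem.Int.floordiv ((((j : Int) - (i : Int)) + 1) * ((j : Int) - (i : Int))) 2
termination_by arr.length - j

def solution (arr : List Int) : Int :=
  if arr.length < 2 then (arr.length : Int)
  else solutionLoop arr 0 1 0

-- ===== PORT B =====
-- state (s, run, count); s = None ↦ none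
def solutionAltStep (st : Option Int × Int × Int) (x : Int) : Option Int × Int × Int :=
  match st with
  | (s, run, count) =>
    match s with
    | some sv =>
        if x < sv then (some sv, run + 1, count + (run + 1))
        else (some x, 1, count + 1)
    | none => (some x, 1, count + 1)

def solution_alt (arr : List Int) : Int :=
  (arr.foldl solutionAltStep (none, 0, 0)).2.2

-- ===== PRECONDITION & SPEC =====
def Spec_solution (arr : List Int) (out : Int) : Prop := out = solution_alt arr
instance (arr : List Int) (out : Int) : Decidable (Spec_solution arr out) := by unfold Spec_solution; infer_instance

-- ===== CLAIM (what is proved, stated in full; the proofs are below) =====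
def Claim_equal_solution : Prop := ∀ (arr : List Int), Dom_solution arr → Spec_solution arr (solution arr)

-- ===== LEMMAS AND PROOFS =====

-- the count B's fold adds beyond the accumulator, given run start s and current run length
def gCount (s : Int) (run : Int) : List Int → Int
  | [] => 0
  | x :: rest =>
      if x < s then (run + 1) + gCount s (run + 1) rest
      else 1 + gCount x 1 rest

def tri (n : Int) : Int := PySem.Int.floordiv ((n + 1) * n) 2

theorem foldB_count (l : List Int) : ∀ (s run c : Int),
    (l.foldl solutionAltStep (some s, run, c)).2.2 = c + gCount s run l := by
  induction l with
  | nil => intro s run c; simp [gCount]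
  | cons x rest ih =>
      intro s run c
      by_cases hx : x < s
      · simp [List.foldl, solutionAltStep, hx, gCount, ih]; ring
      · simp [List.foldl, solutionAltStep, hx, gCount, ih]; ring

theorem tri_succ (n : Int) : tri (n + 1) = tri n + (n + 1) := by
  unfold tri
  have h : (n + 1 + 1) * (n + 1) = (n + 1) * n + (n + 1) * 2 := by ring
  rw [h, PySem.Int.floordiv_eq_ediv_of_pos (by norm_num),
      PySem.Int.floordiv_eq_ediv_of_pos (by norm_num),
      Int.add_mul_ediv_right _ _ (by norm_num : (2:Int) ≠ 0)]

theorem tri_one : tri 1 = 1 := by decide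

theorem loopA_eq (arr : List Int) : ∀ (l : List Int) (i j : Nat) (count : Int),
    i < j → arr.drop j = l → j ≤ arr.length →
    solutionLoop arr i j count
      = count + tri ((j : Int) - (i : Int)) + gCount (arr.getD i 0) ((j : Int) - (i : Int)) l := by
  intro l
  induction l generalizing arr with
  | nil =>
      intro i j count hij hdrop hlen
      have hj : arr.length ≤ j := by
        have := congrArg List.length hdrop
        simp [List.length_drop] at this
        omega
      unfold solutionLoop
      simp [Nat.not_lt.mpr hj, gCount, tri]
  | cons x rest ih =>
      intro i j count hij hdrop hlen
      have hjlt : j < arr.length := by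
        have := congrArg List.length hdrop
        simp [List.length_drop] at this
        omega
      have hx : arr.getD j 0 = x := by
        have h0 : (arr.drop j)[0]? = some x := by rw [hdrop]; rfl
        rw [List.getElem?_drop] at h0
        simp only [Nat.add_zero] at h0
        simp [List.getD_eq_getElem?_getD, h0]
      have hrest : arr.drop (j + 1) = rest := by
        have : arr.drop (j + 1) = (arr.drop j).drop 1 := by
          rw [List.drop_drop]
        rw [this, hdrop]; rfl
      unfold solutionLoop
      rw [dif_pos hjlt, hx]
      by_cases hcmp : x < arr.getD i 0
      · rw [if_pos hcmp]
        rw [ih arr i (j + 1) count (by omega) hrest (by omega)]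
        have hc : ((j + 1 : Nat) : Int) - (i : Int) = ((j : Int) - (i : Int)) + 1 := by
          push_cast; ring
        rw [hc, tri_succ, gCount, if_pos hcmp]
        ring
      · rw [if_neg hcmp]
        rw [ih arr j (j + 1) _ (by omega) hrest (by omega)]
        have hc : ((j + 1 : Nat) : Int) - (j : Int) = 1 := by push_cast; ring
        rw [hc, tri_one, hx, gCount, if_neg hcmp]
        unfold tri
        ring

-- ===== VERDICT (by name: the statement is the Claim_ definition above) =====
theorem solution_spec : Claim_equal_solution := by
  intro arr _
  unfold Spec_solution
  match arr with
  | [] => decide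
  | [x] =>
      simp [solution, solution_alt, List.foldl, solutionAltStep]
  | a :: b :: t =>
      have hlen : ¬ (a :: b :: t).length < 2 := by simp
      unfold solution
      rw [if_neg hlen]
      rw [loopA_eq (a :: b :: t) (b :: t) 0 1 0 (by omega) rfl (by simp)]
      unfold solution_alt
      have : ((a :: b :: t).foldl solutionAltStep (none, 0, 0))
          = ((b :: t).foldl solutionAltStep (some a, 1, 1)) := by
        simp [List.foldl, solutionAltStep]
      rw [this, foldB_count]
      simp [tri_one, List.getD]
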